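-- pv_equiv track=rewrite | github.com/kaxelson/assignment-tracker | src/acc/scrapers/d2l.py | trim_document_preamble
-- ===== SOURCE A (Python) =====
-- DOCUMENT_TEXT_MARKERS = (
--     "OAKTON",
--     "Oakton",
--     "COURSE SYLLABUS",
--     "Course Syllabus",
--     "SYLLABUS",
--     "Syllabus",
-- )
--
-- def trim_document_preamble(text: str) -> str:
--     indexes = [text.find(marker) for marker in DOCUMENT_TEXT_MARKERS if text.find(marker) != -1]
--     if not indexes:
--         return text
--
--     first_marker = min(indexes)
--     if first_marker <= 500:
--         return text[first_marker:].strip()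
--     return text
-- ===== SOURCE B (Python) =====
-- DOCUMENT_TEXT_MARKERS = (
--     "OAKTON",
--     "Oakton",
--     "COURSE SYLLABUS",
--     "Course Syllabus",
--     "SYLLABUS",
--     "Syllabus",
-- )
--
-- def trim_document_preamble(text: str) -> str:
--     # Single left-to-right scan: the first position where any marker starts
--     # is exactly min over the markers' first occurrences.
--     for i in range(len(text)):
--         if any(text.startswith(m, i) for m in DOCUMENT_TEXT_MARKERS):
--             if i <= 500:
--                 return text[i:].strip()
--             return text
--     return text
-- ===== Notes on version B (the rewrite author's own statement) =====
-- stated objective: alternative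
-- what changed: One left-to-right scan that stops at the earliest position where any marker starts, instead of six independent str.find scans whose results are filtered and minimised.
import Mathlib
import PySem

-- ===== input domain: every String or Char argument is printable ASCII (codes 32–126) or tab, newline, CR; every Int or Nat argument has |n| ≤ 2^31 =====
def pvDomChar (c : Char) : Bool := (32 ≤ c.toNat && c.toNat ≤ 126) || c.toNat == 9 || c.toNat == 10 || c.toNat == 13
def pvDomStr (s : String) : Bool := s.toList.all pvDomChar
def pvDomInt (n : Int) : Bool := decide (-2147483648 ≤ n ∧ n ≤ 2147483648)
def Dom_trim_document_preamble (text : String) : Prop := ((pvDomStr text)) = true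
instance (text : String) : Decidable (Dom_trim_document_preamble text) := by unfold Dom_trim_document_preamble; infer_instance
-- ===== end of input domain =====

-- B replaces A's six independent str.find scans + min by a single left-to-right
-- scan stopping at the earliest position where any marker starts (objective: alternative).

-- ===== PORT A =====
def DOCUMENT_TEXT_MARKERS : List String :=
  ["OAKTON", "Oakton", "COURSE SYLLABUS", "Course Syllabus", "SYLLABUS", "Syllabus"]

def trim_document_preamble (text : String) : String :=
  let indexes := (DOCUMENT_TEXT_MARKERS.filter
      (fun marker => PySem.Str.find text marker != -1)).map
      (fun marker => PySem.Str.find text marker)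
  match PySem.List.min? indexes (fun x => x) with
  | none => text
  | some first_marker =>
      if first_marker ≤ 500 then PySem.Str.strip (PySem.Str.slice text (some first_marker) none)
      else text

-- ===== PORT B =====
-- the scan 'for i in range(len(text)): if any(text.startswith(m, i) …)';
-- the suffix text[i:] is maintained incrementally instead of re-dropping i chars
def firstMarkerIdx (i : Nat) (s : List Char) : Option Nat :=
  match s with
  | [] => none
  | c :: rest =>
      if DOCUMENT_TEXT_MARKERS.any (fun m => PySem.Chars.startswith (c :: rest) m.toList) then
        some i
      else firstMarkerIdx (i + 1) rest

def trim_document_preamble_alt (text : String) : String :=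
  match firstMarkerIdx 0 text.toList with
  | none => text
  | some i =>
      if (i : Int) ≤ 500 then PySem.Str.strip (PySem.Str.slice text (some (i : Int)) none)
      else text

-- ===== PRECONDITION & SPEC =====
def Spec_trim_document_preamble (text : String) (out : String) : Prop := out = trim_document_preamble_alt text
instance (text : String) (out : String) : Decidable (Spec_trim_document_preamble text out) := by unfold Spec_trim_document_preamble; infer_instance

-- ===== CLAIM (what is proved, stated in full; the proofs are below) =====
def Claim_equal_trim_document_preamble : Prop := ∀ (text : String), Dom_trim_document_preamble text → Spec_trim_document_preamble text (trim_document_preamble text)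

-- ===== LEMMAS AND PROOFS =====

-- 'some marker starts at position j of cs'
def HitAt (cs : List Char) (j : Nat) : Prop :=
  ∃ m ∈ DOCUMENT_TEXT_MARKERS, m.toList <+: cs.drop j

theorem markers_ne_nil : ∀ m ∈ DOCUMENT_TEXT_MARKERS, m ≠ "" := by decide

theorem hit_iff_any (s : List Char) :
    (DOCUMENT_TEXT_MARKERS.any (fun m => PySem.Chars.startswith s m.toList)) = true ↔ HitAt s 0 := by
  simp [HitAt, List.any_eq_true, PySem.Chars.startswith_iff]

theorem no_hit_nil (j : Nat) : ¬ HitAt [] j := by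
  rintro ⟨m, hm, hp⟩
  simp at hp
  exact markers_ne_nil m hm hp

theorem scan_none (s : List Char) (k : Nat) (h : firstMarkerIdx k s = none) :
    ∀ j, ¬ HitAt s j := by
  induction s generalizing k with
  | nil => exact fun j => no_hit_nil j
  | cons c rest ih =>
      intro j hj
      rw [firstMarkerIdx] at h
      split at h
      · simp at h
      · rename_i hneg
        cases j with
        | zero => exact hneg ((hit_iff_any (c :: rest)).mpr hj)
        | succ j' => exact ih (k + 1) h j' hj

theorem scan_some (s : List Char) (k i : Nat) (h : firstMarkerIdx k s = some i) :
    k ≤ i ∧ HitAt s (i - k) ∧ ∀ j, j < i - k → ¬ HitAt s j := by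
  induction s generalizing k with
  | nil => simp [firstMarkerIdx] at h
  | cons c rest ih =>
      rw [firstMarkerIdx] at h
      split at h
      · rename_i hpos
        injection h with h'
        subst h'
        refine ⟨le_refl _, ?_, fun j hj => absurd hj (by omega)⟩
        simpa [Nat.sub_self] using (hit_iff_any (c :: rest)).mp hpos
      · rename_i hneg
        obtain ⟨h1, h2, h3⟩ := ih (k + 1) h
        refine ⟨by omega, ?_, ?_⟩
        · have he : i - k = (i - (k + 1)) + 1 := by omega
          rw [he]
          simpa using h2
        · intro j hj
          cases j with
          | zero => exact fun hh => hneg ((hit_iff_any (c :: rest)).mpr hh)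
          | succ j' =>
              intro hh
              exact h3 j' (by omega) (by simpa using hh)

-- A's found-marker indexes, characterised
theorem mem_indexes_iff (text : String) (v : Int) :
    v ∈ ((DOCUMENT_TEXT_MARKERS.filter
      (fun marker => PySem.Str.find text marker != -1)).map
      (fun marker => PySem.Str.find text marker)) ↔
      ∃ m ∈ DOCUMENT_TEXT_MARKERS, PySem.Str.find text m = v ∧ v ≠ -1 := by
  simp only [List.mem_map, List.mem_filter, bne_iff_ne, ne_eq]
  constructor
  · rintro ⟨m, ⟨hm, hne⟩, rfl⟩; exact ⟨m, hm, rfl, hne⟩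
  · rintro ⟨m, hm, rfl, hne⟩; exact ⟨m, ⟨hm, hne⟩, rfl⟩

theorem str_find_eq (text m : String) :
    PySem.Str.find text m = PySem.Chars.find text.toList m.toList := by
  simp [PySem.Str.find_eq]

-- a found index is nonnegative and is a hit
theorem find_hit (text : String) (m : String) (hm : m ∈ DOCUMENT_TEXT_MARKERS)
    (h : PySem.Str.find text m ≠ -1) :
    0 ≤ PySem.Str.find text m ∧ HitAt text.toList (PySem.Str.find text m).toNat := by
  rw [str_find_eq] at h ⊢
  have h0 : 0 ≤ PySem.Chars.find text.toList m.toList := by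
    have := PySem.Chars.neg_one_le_find text.toList m.toList
    omega
  exact ⟨h0, m, hm, (PySem.Chars.find_spec h0).1⟩

-- a hit at j forces a found index ≤ j in A's list
theorem hit_gives_index (text : String) (j : Nat) (h : HitAt text.toList j) :
    ∃ v ∈ ((DOCUMENT_TEXT_MARKERS.filter
      (fun marker => PySem.Str.find text marker != -1)).map
      (fun marker => PySem.Str.find text marker)), 0 ≤ v ∧ v.toNat ≤ j := by
  obtain ⟨m, hm, hp⟩ := h
  have hinf : m.toList <:+: text.toList :=
    hp.isInfix.trans (List.drop_suffix j text.toList).isInfix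
  have hne : PySem.Chars.find text.toList m.toList ≠ -1 :=
    (PySem.Chars.find_ne_neg_one_iff _ _).mpr hinf
  have h0 : 0 ≤ PySem.Chars.find text.toList m.toList :=
    (PySem.Chars.find_nonneg_iff _ _).mpr hinf
  refine ⟨PySem.Str.find text m, (mem_indexes_iff text _).mpr ⟨m, hm, rfl, by rwa [str_find_eq]⟩,
    by rwa [str_find_eq], ?_⟩
  rw [str_find_eq]
  by_contra hlt
  push Not at hlt
  exact (PySem.Chars.find_spec h0).2 j hlt hp

theorem trim_document_preamble_core (text : String) :
    trim_document_preamble text = trim_document_preamble_alt text := by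
  simp only [trim_document_preamble, trim_document_preamble_alt]
  cases hscan : firstMarkerIdx 0 text.toList with
  | none =>
      have hnone : ∀ j, ¬ HitAt text.toList j := scan_none _ 0 hscan
      have hidx : ((DOCUMENT_TEXT_MARKERS.filter
          (fun marker => PySem.Str.find text marker != -1)).map
          (fun marker => PySem.Str.find text marker)) = [] := by
        by_contra hne
        obtain ⟨v, hv⟩ := List.exists_mem_of_ne_nil _ hne
        obtain ⟨m, hm, rfl, hvne⟩ := (mem_indexes_iff text v).mp hv
        exact hnone _ (find_hit text m hm hvne).2
      rw [hidx]
      rfl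
  | some i =>
      obtain ⟨-, hhit, hmin⟩ := scan_some _ 0 i hscan
      simp only [Nat.sub_zero] at hhit hmin
      obtain ⟨v, hv, hv0, hvle⟩ := hit_gives_index text i hhit
      cases hm : PySem.List.min? ((DOCUMENT_TEXT_MARKERS.filter
          (fun marker => PySem.Str.find text marker != -1)).map
          (fun marker => PySem.Str.find text marker)) (fun x => x) with
      | none =>
          rw [PySem.List.min?_eq_none_iff] at hm
          rw [hm] at hv
          exact absurd hv (List.not_mem_nil)
      | some w =>
          have hwmem := PySem.List.min?_mem hm
          have hwmin := PySem.List.min?_isMin hm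
          obtain ⟨m, hmm, hfw, hwne⟩ := (mem_indexes_iff text w).mp hwmem
          obtain ⟨hw0, hwhit⟩ := hfw ▸ find_hit text m hmm (hfw ▸ hwne)
          have hge : i ≤ w.toNat := by
            by_contra hlt
            push Not at hlt
            exact hmin w.toNat hlt hwhit
          have hle : w ≤ v := hwmin v hv
          have hwi : w = (i : Int) := by omega
          rw [hwi]

-- ===== VERDICT (by name: the statement is the Claim_ definition above) =====
theorem trim_document_preamble_spec : Claim_equal_trim_document_preamble := by
  intro text _
  exact trim_document_preamble_core text
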